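-- pv_equiv track=rewrite | github.com/pypi-data/pypi-mirror-312 | packages/base-aux/base_aux-0.1.1.tar.gz/base_aux-0.1.1/base_aux/_UFU/func_universal.py | lists_sum
-- ===== SOURCE A (Python) =====
-- def type_is_iterable(source, dict_as_iterable=True, str_and_bytes_as_iterable=True):  # starichenko
--     """checks if source is iterable.
--
--     :param source: source data
--     :param dict_as_iterable: if you dont want to use dict in your selecting,
--         becouse maybe you need flatten all elements in list/set/tuple into one sequence
--         and dict (as extended list) will be irrelevant!
--     :param str_as_iterable: usually in data processing you need to work with str-type elements as OneSolid element
--         but not iterating through chars!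
--     """
--     if isinstance(source, dict):
--         return dict_as_iterable
--     elif isinstance(source, (str, bytes)):
--         return str_and_bytes_as_iterable
--     elif isinstance(source, (tuple, list, set, )):    # need to get it explicitly!!!
--         return True
--     elif hasattr(source, '__iter__') or hasattr(source, '__getitem__'):
--         return True
--     else:
--         return False
--
-- def type_is_iterable_but_not_str(source):   # starichenko
--     """checks if source is iterable, but not exactly str!!!"""
--     return type_is_iterable(source, str_and_bytes_as_iterable=False)
--
-- def sequence_make_ensured_if_not(source):  # starichenko
--     """make sequence if not from source
--
--     useful if you want to make ensured sequence from not known source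
--     """
--     if not type_is_iterable_but_not_str(source):
--         source = [source, ]
--     return source
--
-- def lists_sum(source_lists=[[], [], ], no_repetitions=False):             # Starichenko
--     result_list = []
--     for list_i in source_lists:
--         list_i = sequence_make_ensured_if_not(list_i)
--         for value in list_i:
--             if value in result_list and no_repetitions:
--                 pass
--             else:
--                 result_list.append(value)
--
--     return result_list
-- ===== SOURCE B (Python) =====
-- def lists_sum(source_lists=[[], [], ], no_repetitions=False):
--     # B: flatten by comprehension, then dedup by a sieve: repeatedly take the head
--     # and filter all its equal occurrences out of the tail (no membership tests).
--     flat = [value for list_i in source_lists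
--             for value in sequence_make_ensured_if_not(list_i)]
--     if not no_repetitions:
--         return flat
--     result = []
--     while flat:
--         head = flat[0]
--         result.append(head)
--         flat = [v for v in flat[1:] if v != head]
--     return result
--
--
-- def sequence_make_ensured_if_not(source):
--     if isinstance(source, (str, bytes)) or not (
--         isinstance(source, (dict, tuple, list, set))
--         or hasattr(source, '__iter__') or hasattr(source, '__getitem__')
--     ):
--         source = [source, ]
--     return source
-- ===== Notes on version B (the rewrite author's own statement) =====
-- stated objective: alternative
-- what changed: A dedups inline with a membership test against the growing result inside one interleaved nested loop; B flattens by comprehension and then dedups with a sieve that repeatedly takes the head and filters all its equal occurrences out of the remaining tail, with no membership test at all.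
import Mathlib
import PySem

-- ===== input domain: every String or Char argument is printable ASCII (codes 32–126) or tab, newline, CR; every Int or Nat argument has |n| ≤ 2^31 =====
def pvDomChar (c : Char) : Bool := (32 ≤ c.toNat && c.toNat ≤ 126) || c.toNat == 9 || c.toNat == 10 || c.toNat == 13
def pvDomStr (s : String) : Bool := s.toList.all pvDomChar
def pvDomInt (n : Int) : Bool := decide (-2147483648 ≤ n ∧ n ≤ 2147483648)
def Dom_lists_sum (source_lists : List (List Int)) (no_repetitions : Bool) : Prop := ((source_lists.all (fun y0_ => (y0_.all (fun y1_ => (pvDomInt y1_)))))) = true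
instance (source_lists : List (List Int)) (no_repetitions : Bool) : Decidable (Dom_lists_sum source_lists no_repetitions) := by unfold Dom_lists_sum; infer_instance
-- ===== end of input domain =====

-- B flattens by comprehension and dedups with a head-and-filter sieve (no membership tests),
-- instead of A's interleaved nested loop with a membership test; same order of cost, different algorithm.

-- ===== PORT A =====
-- sequence_make_ensured_if_not: on a List Int argument, type_is_iterable_but_not_str is always
-- True (lists are iterable, not str), so the helper returns its argument unchanged.
def seqEnsureA (source : List Int) : List Int := source

def lists_sum (source_lists : List (List Int)) (no_repetitions : Bool) : List Int :=
  source_lists.foldl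
    (fun result_list list_i =>
      (seqEnsureA list_i).foldl
        (fun result_list value =>
          if result_list.contains value && no_repetitions then result_list
          else result_list ++ [value])
        result_list)
    []

-- ===== PORT B =====
-- same helper, B-side copy
def seqEnsureB (source : List Int) : List Int := source

-- the sieve loop of Source B: take the head, filter its equal occurrences out of the tail
def sieveDedup : List Int → List Int
  | [] => []
  | head :: rest => head :: sieveDedup (rest.filter (fun v => v != head))
termination_by xs => xs.length
decreasing_by
  simp
  exact List.length_filter_le _ _

def lists_sum_alt (source_lists : List (List Int)) (no_repetitions : Bool) : List Int :=
  let flat := source_lists.flatMap (fun list_i => seqEnsureB list_i)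
  if !no_repetitions then flat
  else sieveDedup flat

-- ===== PRECONDITION & SPEC =====
def Spec_lists_sum (source_lists : List (List Int)) (no_repetitions : Bool) (out : List Int) : Prop := out = lists_sum_alt source_lists no_repetitions
instance (source_lists : List (List Int)) (no_repetitions : Bool) (out : List Int) : Decidable (Spec_lists_sum source_lists no_repetitions out) := by unfold Spec_lists_sum; infer_instance

-- ===== CLAIM (what is proved, stated in full; the proofs are below) =====
def Claim_equal_lists_sum : Prop := ∀ (source_lists : List (List Int)) (no_repetitions : Bool), Dom_lists_sum source_lists no_repetitions → Spec_lists_sum source_lists no_repetitions (lists_sum source_lists no_repetitions)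

-- ===== LEMMAS AND PROOFS =====

-- the flattening fold pulls the accumulator out front
theorem flat_pull (ls : List (List Int)) (init : List Int) :
    ls.foldl (fun flat l => flat ++ l) init
      = init ++ ls.foldl (fun flat l => flat ++ l) [] := by
  induction ls generalizing init with
  | nil => simp
  | cons l ls ih =>
      simp only [List.foldl_cons, List.nil_append]
      rw [ih, ih l, List.append_assoc]

-- A's nested fold over source_lists equals the same inner step folded over the flattened list
theorem foldA_flatten (step : List Int → Int → List Int) (ls : List (List Int)) (init : List Int) :
    ls.foldl (fun acc l => l.foldl step acc) init
      = (ls.foldl (fun flat l => flat ++ l) []).foldl step init := by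
  induction ls generalizing init with
  | nil => rfl
  | cons l ls ih =>
      simp only [List.foldl_cons, List.nil_append]
      rw [ih, flat_pull ls l, List.foldl_append]

theorem fold_append_flatten (ls : List (List Int)) :
    ls.foldl (fun flat l => flat ++ l) [] = ls.flatMap (fun l => l) := by
  induction ls with
  | nil => rfl
  | cons l ls ih => rw [List.foldl_cons, List.nil_append, flat_pull, ih]; simp

theorem append_fold (xs init : List Int) :
    xs.foldl (fun acc v => acc ++ [v]) init = init ++ xs := by
  induction xs generalizing init with
  | nil => simp
  | cons x xs ih => simp [ih]

@[simp] theorem sieveDedup_nil : sieveDedup [] = [] := by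
  simp [sieveDedup]

theorem sieveDedup_cons (h : Int) (t : List Int) :
    sieveDedup (h :: t) = h :: sieveDedup (t.filter (fun v => v != h)) := by
  simp [sieveDedup]

-- invariant linking A's membership-test fold to B's sieve
theorem fold_dedup_sieve (xs acc : List Int) :
    xs.foldl (fun acc v => if acc.contains v then acc else acc ++ [v]) acc
      = acc ++ sieveDedup (xs.filter (fun v => !acc.contains v)) := by
  induction hn : xs.length using Nat.strong_induction_on generalizing xs acc with
  | _ n ih =>
    cases xs with
    | nil => simp
    | cons v rest =>
      simp only [List.foldl_cons, List.filter_cons]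
      by_cases h : acc.contains v
      · simp only [h, if_true, Bool.not_true, Bool.false_eq_true, if_false]
        exact ih rest.length (by simp [← hn]) rest acc rfl
      · have h' : acc.contains v = false := by simpa using h
        simp only [h', Bool.false_eq_true, if_false, Bool.not_false, if_true]
        rw [ih rest.length (by simp [← hn]) rest (acc ++ [v]) rfl]
        have hf : rest.filter (fun w => !(acc ++ [v]).contains w)
            = (rest.filter (fun w => !acc.contains w)).filter (fun w => w != v) := by
          rw [List.filter_filter]
          apply List.filter_congr
          intro w _
          by_cases hw : w = v <;> by_cases ha : w ∈ acc <;>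
            simp [List.mem_append, hw, ha, bne]
        rw [hf, sieveDedup_cons]
        simp

theorem lists_sum_spec : Claim_equal_lists_sum := by
  intro ls nr _
  unfold Spec_lists_sum lists_sum lists_sum_alt
  simp only [seqEnsureA, seqEnsureB]
  cases nr with
  | false =>
      simp only [Bool.and_false, Bool.not_false, if_true, Bool.false_eq_true, if_false]
      rw [foldA_flatten, fold_append_flatten, append_fold, List.nil_append]
  | true =>
      simp only [Bool.and_true, Bool.not_true, Bool.false_eq_true, if_false]
      rw [foldA_flatten, fold_dedup_sieve, fold_append_flatten]
      simp only [List.contains_nil, Bool.not_false, List.filter_true, List.nil_append]
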